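-- pv_equiv track=rewrite | github.com/dbaltaza/a-maze-ing | app/renderer_curses.py | _path_cells
-- ===== SOURCE A (Python) =====
-- def _path_cells(entry: tuple[int, int], moves: str) -> set[tuple[int, int]]:
--     x, y = entry
--     cells: set[tuple[int, int]] = {(x, y)}
--     deltas = {"N": (0, -1), "E": (1, 0), "S": (0, 1), "W": (-1, 0)}
--     for step in moves:
--         delta = deltas.get(step)
--         if delta is None:
--             continue
--         dx, dy = delta
--         x += dx
--         y += dy
--         cells.add((x, y))
--     return cells
-- ===== SOURCE B (Python) =====
-- def _path_cells(entry: tuple[int, int], moves: str) -> set[tuple[int, int]]: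
--     deltas = {"N": (0, -1), "E": (1, 0), "S": (0, 1), "W": (-1, 0)}
--
--     def go(pos, lo, hi):
--         """Return (cells visited over moves[lo:hi] starting at pos, end position)."""
--         if lo == hi:
--             return {pos}, pos
--         if hi - lo == 1:
--             d = deltas.get(moves[lo])
--             if d is None:
--                 return {pos}, pos
--             q = (pos[0] + d[0], pos[1] + d[1])
--             return {pos, q}, q
--         mid = (lo + hi) // 2
--         s1, p1 = go(pos, lo, mid)
--         s2, p2 = go(p1, mid, hi)
--         return s1 | s2, p2
--
--     cells, _ = go(entry, 0, len(moves))
--     return cells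
-- ===== Notes on version B (the rewrite author's own statement) =====
-- stated objective: alternative
-- what changed: Replaces A's single left-to-right loop mutating (x,y) and inserting into one set with a divide-and-conquer recursion: each half of the move string returns its visited-cell set and end position, the right half starts from the left half's end position, and the two sets are merged by set union.
import Mathlib
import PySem

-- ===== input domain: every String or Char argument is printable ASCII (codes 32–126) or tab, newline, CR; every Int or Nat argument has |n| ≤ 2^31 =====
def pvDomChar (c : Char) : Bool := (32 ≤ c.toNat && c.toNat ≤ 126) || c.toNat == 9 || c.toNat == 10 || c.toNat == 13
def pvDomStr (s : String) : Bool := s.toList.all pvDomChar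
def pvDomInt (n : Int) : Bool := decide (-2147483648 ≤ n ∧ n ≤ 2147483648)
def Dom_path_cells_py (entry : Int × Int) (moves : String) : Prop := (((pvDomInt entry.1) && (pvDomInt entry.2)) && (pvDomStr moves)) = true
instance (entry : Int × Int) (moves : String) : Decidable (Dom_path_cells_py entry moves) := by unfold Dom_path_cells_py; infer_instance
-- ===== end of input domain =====

-- B replaces A's single left-to-right mutate-and-add loop with a divide-and-conquer recursion
-- (each half returns its cell set and end position; halves are combined by set union) — alternative decomposition, same result.

-- ===== PORT A =====
def pcDeltasA : PySem.Dict Char (Int × Int) :=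
  PySem.Dict.ofList [('N', (0, -1)), ('E', (1, 0)), ('S', (0, 1)), ('W', (-1, 0))]

def path_cells_py (entry : Int × Int) (moves : String) : List (Int × Int) :=
  (moves.toList.foldl
    (fun (st : (Int × Int) × PySem.Set (Int × Int)) step =>
      match PySem.Dict.get? pcDeltasA step with
      | none => st
      | some d =>
        let p := (st.1.1 + d.1, st.1.2 + d.2)
        (p, PySem.Set.add st.2 p))
    (entry, PySem.Set.ofList [entry])).2

-- ===== PORT B =====
def pcDeltasB : PySem.Dict Char (Int × Int) :=
  PySem.Dict.ofList [('N', (0, -1)), ('E', (1, 0)), ('S', (0, 1)), ('W', (-1, 0))]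

/-- `go(pos, lo, hi)` of Source B: the slice `moves[lo:hi]` is passed as a list. Returns (cells, end position). -/
def pcGo : (Int × Int) → List Char → PySem.Set (Int × Int) × (Int × Int)
  | pos, [] => (PySem.Set.ofList [pos], pos)
  | pos, [c] =>
    match PySem.Dict.get? pcDeltasB c with
    | none => (PySem.Set.ofList [pos], pos)
    | some d =>
      let q := (pos.1 + d.1, pos.2 + d.2)
      (PySem.Set.ofList [pos, q], q)
  | pos, c1 :: c2 :: rest =>
    let l := c1 :: c2 :: rest
    let m := l.length / 2
    let r1 := pcGo pos (l.take m)
    let r2 := pcGo r1.2 (l.drop m)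
    (PySem.Set.union r1.1 r2.1, r2.2)
termination_by _ l => l.length
decreasing_by
  · simp [List.length_take]; omega
  · simp [List.length_drop]; omega

def path_cells_py_alt (entry : Int × Int) (moves : String) : List (Int × Int) :=
  (pcGo entry moves.toList).1

-- ===== PRECONDITION & SPEC =====
def Spec_path_cells_py (entry : Int × Int) (moves : String) (out : List (Int × Int)) : Prop := out = path_cells_py_alt entry moves
instance (entry : Int × Int) (moves : String) (out : List (Int × Int)) : Decidable (Spec_path_cells_py entry moves out) := by unfold Spec_path_cells_py; infer_instance

-- ===== CLAIM (what is proved, stated in full; the proofs are below) =====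
def Claim_equal_path_cells_py : Prop := ∀ (entry : Int × Int) (moves : String), Dom_path_cells_py entry moves → Spec_path_cells_py entry moves (path_cells_py entry moves)

-- ===== LEMMAS AND PROOFS =====

/-- The positions visited after `p` along the valid moves of `l`, in order. -/
def pcVisits (p : Int × Int) : List Char → List (Int × Int)
  | [] => []
  | c :: rest =>
    match PySem.Dict.get? pcDeltasA c with
    | none => pcVisits p rest
    | some d => (p.1 + d.1, p.2 + d.2) :: pcVisits (p.1 + d.1, p.2 + d.2) rest

/-- The position reached after walking the valid moves of `l` from `p`. -/
def pcEnd (p : Int × Int) : List Char → (Int × Int)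
  | [] => p
  | c :: rest =>
    match PySem.Dict.get? pcDeltasA c with
    | none => pcEnd p rest
    | some d => pcEnd (p.1 + d.1, p.2 + d.2) rest

theorem pcEnd_append (l1 l2 : List Char) : ∀ p, pcEnd p (l1 ++ l2) = pcEnd (pcEnd p l1) l2 := by
  induction l1 with
  | nil => intro p; simp [pcEnd]
  | cons c rest ih =>
    intro p
    simp only [List.cons_append, pcEnd]
    cases PySem.Dict.get? pcDeltasA c with
    | none => exact ih p
    | some d => exact ih _

theorem pcVisits_append (l1 l2 : List Char) :
    ∀ p, pcVisits p (l1 ++ l2) = pcVisits p l1 ++ pcVisits (pcEnd p l1) l2 := by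
  induction l1 with
  | nil => intro p; simp [pcVisits, pcEnd]
  | cons c rest ih =>
    intro p
    simp only [List.cons_append, pcVisits, pcEnd]
    cases PySem.Dict.get? pcDeltasA c with
    | none => exact ih p
    | some d => simp [ih]

theorem pcEnd_mem (l : List Char) : ∀ p, pcEnd p l ∈ p :: pcVisits p l := by
  induction l with
  | nil => intro p; simp [pcEnd, pcVisits]
  | cons c rest ih =>
    intro p
    simp only [pcEnd, pcVisits]
    cases PySem.Dict.get? pcDeltasA c with
    | none => exact ih p
    | some d =>
      have := ih (p.1 + d.1, p.2 + d.2)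
      simp only [List.mem_cons] at this ⊢
      tauto

theorem a_fold (l : List Char) :
    ∀ (p : Int × Int) (s : PySem.Set (Int × Int)),
    (l.foldl
      (fun (st : (Int × Int) × PySem.Set (Int × Int)) step =>
        match PySem.Dict.get? pcDeltasA step with
        | none => st
        | some d =>
          let q := (st.1.1 + d.1, st.1.2 + d.2)
          (q, PySem.Set.add st.2 q))
      (p, s)) = (pcEnd p l, PySem.Set.update s (pcVisits p l)) := by
  induction l with
  | nil => intro p s; simp [pcEnd, pcVisits, PySem.Set.update]
  | cons c rest ih =>
    intro p s
    simp only [List.foldl_cons, pcEnd, pcVisits]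
    cases PySem.Dict.get? pcDeltasA c with
    | none => exact ih p s
    | some d =>
      simp only [ih, PySem.Set.update_cons]

theorem update_ofList_right (s : PySem.Set (Int × Int)) (xs : List (Int × Int)) :
    PySem.Set.update s (PySem.Set.ofList xs) = PySem.Set.update s xs := by
  simp [PySem.Set.update_eq_append_filter]

theorem b_go (n : ℕ) : ∀ (l : List Char), l.length ≤ n → ∀ p,
    pcGo p l = (PySem.Set.ofList (p :: pcVisits p l), pcEnd p l) := by
  induction n with
  | zero =>
    intro l hl p
    have : l = [] := List.eq_nil_of_length_eq_zero (Nat.le_zero.mp hl)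
    subst this; simp [pcGo, pcVisits, pcEnd]
  | succ n ih =>
    intro l hl p
    match l with
    | [] => simp [pcGo, pcVisits, pcEnd]
    | [c] =>
      have hd : PySem.Dict.get? pcDeltasB c = PySem.Dict.get? pcDeltasA c := rfl
      simp only [pcGo, pcVisits, pcEnd, hd]
      cases PySem.Dict.get? pcDeltasA c with
      | none => simp
      | some d => simp
    | c1 :: c2 :: rest =>
      rw [pcGo]
      have hlen : (c1 :: c2 :: rest).length = rest.length + 2 := by simp
      set L : List Char := c1 :: c2 :: rest with hL
      set m := L.length / 2 with hm
      have hm1 : 1 ≤ m := by rw [hm, hL]; simp; omega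
      have hmlt : m < L.length := by rw [hm]; omega
      have h1 : (L.take m).length ≤ n := by
        simp only [List.length_take]
        rw [hL] at hl ⊢; simp at hl ⊢; omega
      have h2 : (L.drop m).length ≤ n := by
        simp only [List.length_drop]
        rw [hL] at hl ⊢; simp at hl ⊢; omega
      rw [ih (L.take m) h1 p]
      rw [ih (L.drop m) h2 _]
      simp only
      have hsplit : L = L.take m ++ L.drop m := (List.take_append_drop m L).symm
      have hEnd : pcEnd p L = pcEnd (pcEnd p (L.take m)) (L.drop m) := by
        conv_lhs => rw [hsplit]
        exact pcEnd_append _ _ p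
      have hVis : pcVisits p L = pcVisits p (L.take m) ++ pcVisits (pcEnd p (L.take m)) (L.drop m) := by
        conv_lhs => rw [hsplit]
        exact pcVisits_append _ _ p
      refine Prod.ext ?_ hEnd.symm
      show PySem.Set.union (PySem.Set.ofList (p :: pcVisits p (L.take m)))
          (PySem.Set.ofList (pcEnd p (L.take m) :: pcVisits (pcEnd p (L.take m)) (L.drop m)))
        = PySem.Set.ofList (p :: pcVisits p L)
      have hu : PySem.Set.union (PySem.Set.ofList (p :: pcVisits p (L.take m)))
          (PySem.Set.ofList (pcEnd p (L.take m) :: pcVisits (pcEnd p (L.take m)) (L.drop m)))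
        = PySem.Set.update (PySem.Set.ofList (p :: pcVisits p (L.take m)))
            (pcEnd p (L.take m) :: pcVisits (pcEnd p (L.take m)) (L.drop m)) := by
        show PySem.Set.update _ _ = _
        exact update_ofList_right _ _
      rw [hu, PySem.Set.update_cons]
      have hmem : pcEnd p (L.take m) ∈ PySem.Set.ofList (p :: pcVisits p (L.take m)) := by
        rw [PySem.Set.mem_ofList]
        exact pcEnd_mem _ p
      rw [PySem.Set.add_of_mem hmem, ← PySem.Set.ofList_append]
      simp [hVis]

-- ===== VERDICT (by name: the statement is the Claim_ definition above) =====
theorem path_cells_py_spec : Claim_equal_path_cells_py := by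
  intro entry moves _
  unfold Spec_path_cells_py path_cells_py path_cells_py_alt
  rw [a_fold, b_go moves.toList.length moves.toList le_rfl entry]
  show PySem.Set.update (PySem.Set.ofList [entry]) _ = _
  have : PySem.Set.ofList [entry] = PySem.Set.add PySem.Set.empty entry := rfl
  rw [this, ← PySem.Set.update_cons]
  rfl
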